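-- pv_equiv track=rewrite | github.com/theandypeterson/advent-of-code-2023 | day-01/puzzle2.py | process_calibration_document
-- ===== SOURCE A (Python) =====
-- spelled_numbers_to_digits = {
--   'one': 1,
--   'two': 2,
--   'three': 3,
--   'four': 4,
--   'five': 5,
--   'six': 6,
--   'seven': 7,
--   'eight': 8,
--   'nine': 9,
--   'zero': 0,
-- }
--
-- spelled_numbers = spelled_numbers_to_digits.keys()
--
-- def line_to_spelled_number(line):
--   for spelled_number in spelled_numbers:
--     if spelled_number in line:
--       return spelled_number
--   return False
--
-- def get_first_digit(line):
--   spelled_number = ''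
--   for character in line:
--     if character.isdigit():
--       spelled_number = ''
--       return int(character)
--     if character.isalpha():
--       spelled_number += character
--       maybe_spelled_number = line_to_spelled_number(spelled_number)
--       if maybe_spelled_number:
--         return spelled_numbers_to_digits[maybe_spelled_number]
--   return 0
--
-- def get_last_digit(line):
--   spelled_number = ''
--   for character in reversed(line):
--     if character.isdigit():
--       spelled_number = ''
--       return int(character)
--     if character.isalpha():
--       spelled_number = character + spelled_number
--       maybe_spelled_number = line_to_spelled_number(spelled_number)
--       if maybe_spelled_number:
--         return spelled_numbers_to_digits[maybe_spelled_number]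
--   return 0
--
-- def process_calibration_document(document):
--   total = 0
--   for line in document:
--     first_digit = get_first_digit(line)
--     last_digit = get_last_digit(line)
--     calibration_value = int(f"{first_digit}{last_digit}")
--     total += calibration_value
--   return total
-- ===== SOURCE B (Python) =====
-- _PATTERNS = [('one', 1), ('two', 2), ('three', 3), ('four', 4), ('five', 5),
--              ('six', 6), ('seven', 7), ('eight', 8), ('nine', 9), ('zero', 0)]
-- _PATTERNS_REV = [(w[::-1], v) for w, v in _PATTERNS]
-- _WORDS = tuple(w for w, _ in _PATTERNS)
-- _WORDS_REV = tuple(w for w, _ in _PATTERNS_REV)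
-- _LASTS = 'eorxnt'      # the characters a spelled number can end with
-- _LASTS_REV = 'otfsenz' # likewise for the reversed spellings
--
-- def _scan(chars, words, pairs, lasts):
--   # One pass: keep only the last 5 letters seen; a spelled number is complete
--   # exactly when it is a suffix of that buffer (it can only complete on a
--   # character in `lasts`).
--   buf = ''
--   for c in chars:
--     if c.isdigit():
--       return ord(c) - 48
--     if c.isalpha():
--       buf = (buf + c)[-5:]
--       if c in lasts and buf.endswith(words):
--         for w, v in pairs:
--           if buf.endswith(w):
--             return v
--   return 0
--
-- def process_calibration_document(document):
--   total = 0
--   for line in document: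
--     first = _scan(line, _WORDS, _PATTERNS, _LASTS)
--     last = _scan(line[::-1], _WORDS_REV, _PATTERNS_REV, _LASTS_REV)
--     total += 10 * first + last
--   return total
-- ===== Notes on version B (the rewrite author's own statement) =====
-- stated objective: faster
-- what changed: A re-scans the whole growing letter-accumulator for all ten spelled numbers at every character; B keeps only the last five letters seen and does one bounded suffix check per character against that buffer.
import Mathlib
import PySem

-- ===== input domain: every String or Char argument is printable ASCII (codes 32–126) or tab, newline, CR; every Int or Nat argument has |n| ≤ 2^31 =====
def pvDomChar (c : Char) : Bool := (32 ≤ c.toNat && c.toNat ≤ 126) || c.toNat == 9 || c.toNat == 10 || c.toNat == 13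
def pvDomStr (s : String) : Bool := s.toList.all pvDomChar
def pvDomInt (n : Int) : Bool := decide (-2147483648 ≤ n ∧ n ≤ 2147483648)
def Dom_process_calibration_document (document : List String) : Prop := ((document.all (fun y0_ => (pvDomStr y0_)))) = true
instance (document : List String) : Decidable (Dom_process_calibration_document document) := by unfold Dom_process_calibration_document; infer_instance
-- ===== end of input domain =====

-- B replaces A's substring search over a growing accumulator by a single pass that keeps
-- only the last five letters and checks suffix matches against that bounded buffer (objective: faster).

-- ===== PORT A =====
-- the dict spelled_numbers_to_digits (insertion order)
def pvSpelledToDigits : PySem.Dict (List Char) Int :=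
  PySem.Dict.mk
  [(['o','n','e'], 1), (['t','w','o'], 2), (['t','h','r','e','e'], 3), (['f','o','u','r'], 4),
   (['f','i','v','e'], 5), (['s','i','x'], 6), (['s','e','v','e','n'], 7), (['e','i','g','h','t'], 8),
   (['n','i','n','e'], 9), (['z','e','r','o'], 0)]

-- spelled_numbers = spelled_numbers_to_digits.keys()
def pvSpelledNumbers : List (List Char) := PySem.Dict.keys pvSpelledToDigits

-- `spelled_number in line` is Python substring containment: PySem.Chars.isIn
def line_to_spelled_number (line : List Char) : Option (List Char) :=
  pvSpelledNumbers.find? (fun w => PySem.Chars.isIn w line)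

-- the loop of get_first_digit, with the accumulator spelled_number as state;
-- int(character) on an ASCII digit is its code minus 48; the dict lookup
-- spelled_numbers_to_digits[w] always finds w (w came from the key list), ported as getD.
def getFirstGo : List Char → List Char → Int
  | [], _ => 0
  | c :: rest, sp =>
    if c.isDigit then ((c.toNat : Int) - 48)
    else if c.isAlpha then
      match line_to_spelled_number (sp ++ [c]) with
      | some w => PySem.Dict.getD pvSpelledToDigits w 0
      | none => getFirstGo rest (sp ++ [c])
    else getFirstGo rest sp

def get_first_digit (line : List Char) : Int := getFirstGo line []

-- get_last_digit iterates reversed(line) and prepends: spelled_number = character + spelled_number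
def getLastGo : List Char → List Char → Int
  | [], _ => 0
  | c :: rest, sp =>
    if c.isDigit then ((c.toNat : Int) - 48)
    else if c.isAlpha then
      match line_to_spelled_number (c :: sp) with
      | some w => PySem.Dict.getD pvSpelledToDigits w 0
      | none => getLastGo rest (c :: sp)
    else getLastGo rest sp

def get_last_digit (line : List Char) : Int := getLastGo line.reverse []

-- int(f"{first_digit}{last_digit}"): both digits rendered with str and re-parsed
-- (the parse always succeeds here, ported with getD)
def process_calibration_document (document : List String) : Int :=
  document.foldl (fun total line =>
    let first_digit := get_first_digit line.toList
    let last_digit := get_last_digit line.toList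
    total + (PySem.Int.ofChars? (PySem.Int.toChars first_digit ++ PySem.Int.toChars last_digit)).getD 0) 0

-- ===== PORT B =====
def pvPats : List (List Char × Int) :=
  [(['o','n','e'], 1), (['t','w','o'], 2), (['t','h','r','e','e'], 3), (['f','o','u','r'], 4),
   (['f','i','v','e'], 5), (['s','i','x'], 6), (['s','e','v','e','n'], 7), (['e','i','g','h','t'], 8),
   (['n','i','n','e'], 9), (['z','e','r','o'], 0)]

-- _PATTERNS_REV = [(w[::-1], v) for w, v in _PATTERNS]
def pvPatsRev : List (List Char × Int) := pvPats.map (fun wv => (wv.1.reverse, wv.2))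

-- _LASTS / _LASTS_REV: the characters a (reversed) spelled number can end with
def pvLasts : List Char := ['e', 'o', 'r', 'x', 'n', 't']
def pvLastsRev : List Char := ['o', 't', 'f', 's', 'e', 'n', 'z']

-- _scan: ord(c) - 48 is the digit's value; buf = (buf + c)[-5:] (Python s[-5:] keeps the
-- last min(5, len) chars: drop (len-5)); `c in lasts` on a single char is membership;
-- `buf.endswith(words)` with a tuple is `any`; the inner
-- `for w, v: if buf.endswith(w): return v` is findSome? over the pattern list
def scanGo : List Char → List Char → List (List Char × Int) → List Char → Int
  | [], _, _, _ => 0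
  | c :: rest, buf, ws, lasts =>
    if c.isDigit then ((c.toNat : Int) - 48)
    else if c.isAlpha then
      let buf' := (buf ++ [c]).drop ((buf ++ [c]).length - 5)
      if lasts.contains c && ws.any (fun wv => wv.1.isSuffixOf buf') then
        match ws.findSome? (fun wv => if wv.1.isSuffixOf buf' then some wv.2 else none) with
        | some v => v
        | none => scanGo rest buf' ws lasts
      else scanGo rest buf' ws lasts
    else scanGo rest buf ws lasts

def process_calibration_document_alt (document : List String) : Int :=
  document.foldl (fun total line =>
    total + (10 * scanGo line.toList [] pvPats pvLasts
      + scanGo line.toList.reverse [] pvPatsRev pvLastsRev)) 0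

-- ===== PRECONDITION & SPEC =====
def Spec_process_calibration_document (document : List String) (out : Int) : Prop := out = process_calibration_document_alt document
instance (document : List String) (out : Int) : Decidable (Spec_process_calibration_document document out) := by unfold Spec_process_calibration_document; infer_instance

-- ===== CLAIM (what is proved, stated in full; the proofs are below) =====
def Claim_equal_process_calibration_document : Prop := ∀ (document : List String), Dom_process_calibration_document document → Spec_process_calibration_document document (process_calibration_document document)

-- ===== LEMMAS AND PROOFS =====

-- facts about the ten spelled numbers, all decidable
lemma words_ne_nil : ∀ w ∈ pvSpelledNumbers, w ≠ [] := by decide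

lemma words_len : ∀ w ∈ pvSpelledNumbers, w.length ≤ 5 := by decide

lemma words_no_suffix : ∀ w1 ∈ pvSpelledNumbers, ∀ w2 ∈ pvSpelledNumbers, w1 <:+ w2 → w1 = w2 := by decide

lemma words_no_prefix : ∀ w1 ∈ pvSpelledNumbers, ∀ w2 ∈ pvSpelledNumbers, w1 <+: w2 → w1 = w2 := by decide

lemma pats_keys : pvPats.map (·.1) = pvSpelledNumbers := by decide

lemma pats_getD : ∀ wv ∈ pvPats, PySem.Dict.getD pvSpelledToDigits wv.1 0 = wv.2 := by decide

lemma pats_key_inj : ∀ wv1 ∈ pvPats, ∀ wv2 ∈ pvPats, wv1.1 = wv2.1 → wv1 = wv2 := by decide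

lemma patsRev_key_inj : ∀ wv1 ∈ pvPatsRev, ∀ wv2 ∈ pvPatsRev, wv1.1 = wv2.1 → wv1 = wv2 := by decide

lemma pats_range : ∀ wv ∈ pvPats, 0 ≤ wv.2 ∧ wv.2 ≤ 9 := by decide

lemma patsRev_range : ∀ wv ∈ pvPatsRev, 0 ≤ wv.2 ∧ wv.2 ≤ 9 := by decide

lemma words_last : ∀ w ∈ pvSpelledNumbers, pvLasts.contains (w.getLast?.getD ' ') = true := by decide

lemma patsRev_last : ∀ wv ∈ pvPatsRev, pvLastsRev.contains (wv.1.getLast?.getD ' ') = true := by decide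

-- a word newly infix of c :: p (not infix of p) starts at the new character
lemma infix_cons_elim {w p : List Char} {c : Char} (h : w <:+: c :: p) (hn : ¬ w <:+: p) : w <+: c :: p := by
  rcases List.infix_cons_iff.mp h with h1 | h2
  · exact h1
  · exact absurd h2 hn

-- a word newly infix of p ++ [c] ends at the new character
lemma infix_snoc_elim {w p : List Char} {c : Char} (h : w <:+: p ++ [c]) (hn : ¬ w <:+: p) : w <:+ p ++ [c] := by
  have h' : w.reverse <:+: c :: p.reverse := by
    simpa using List.reverse_infix.mpr h
  have hn' : ¬ w.reverse <:+: p.reverse := fun hc => hn (by simpa using List.reverse_infix.mp hc)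
  have := infix_cons_elim h' hn'
  have : w.reverse <+: (p ++ [c]).reverse := by simpa using this
  exact List.reverse_prefix.mp this

-- a short suffix survives truncation to the last five characters
lemma suffix_drop5 {w q : List Char} (h : w <:+ q) (hl : w.length ≤ 5) : w <:+ q.drop (q.length - 5) := by
  obtain ⟨u, rfl⟩ := h
  rw [List.drop_append_of_le_length (by simp; omega)]
  exact ⟨_, rfl⟩

lemma buf_step (p : List Char) (c : Char) :
    (p.drop (p.length - 5) ++ [c]).drop ((p.drop (p.length - 5) ++ [c]).length - 5)
      = (p ++ [c]).drop ((p ++ [c]).length - 5) := by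
  rw [← List.drop_append_of_le_length (Nat.sub_le _ _), List.drop_drop]
  congr 1
  simp
  omega

lemma suffix_unique {w1 w2 q : List Char} (h1 : w1 ∈ pvSpelledNumbers) (h2 : w2 ∈ pvSpelledNumbers)
    (s1 : w1 <:+ q) (s2 : w2 <:+ q) : w1 = w2 := by
  rcases List.suffix_or_suffix_of_suffix s1 s2 with h | h
  · exact words_no_suffix w1 h1 w2 h2 h
  · exact (words_no_suffix w2 h2 w1 h1 h).symm

lemma find?_unique {α : Type} {p : α → Bool} {l : List α} {x : α} (hx : x ∈ l) (hp : p x = true)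
    (huniq : ∀ y ∈ l, p y = true → y = x) : l.find? p = some x := by
  induction l with
  | nil => cases hx
  | cons a t ih =>
    by_cases ha : p a = true
    · rw [List.find?_cons_of_pos ha, huniq a List.mem_cons_self ha]
    · rw [List.find?_cons_of_neg (by simpa using ha)]
      rcases List.mem_cons.mp hx with rfl | hx'
      · exact absurd hp ha
      · exact ih hx' (fun y hy => huniq y (List.mem_cons_of_mem _ hy))

lemma findSome?_unique {l : List (List Char × Int)} {p : List Char → Bool} {w : List Char} {v : Int}
    (hmem : (w, v) ∈ l) (hp : p w = true)
    (huniq : ∀ wv ∈ l, p wv.1 = true → wv = (w, v)) :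
    l.findSome? (fun wv => if p wv.1 then some wv.2 else none) = some v := by
  induction l with
  | nil => cases hmem
  | cons a t ih =>
    by_cases ha : p a.1 = true
    · have : a = (w, v) := huniq a List.mem_cons_self ha
      subst this
      simp [ha]
    · rcases List.mem_cons.mp hmem with rfl | hm'
      · exact absurd hp ha
      · simp only [List.findSome?_cons, ha, Bool.false_eq_true, if_false]
        exact ih hm' (fun wv hwv => huniq wv (List.mem_cons_of_mem _ hwv))

-- two spelled numbers that are suffixes (resp. prefixes) of the same string coincide
lemma prefix_unique {w1 w2 q : List Char} (h1 : w1 ∈ pvSpelledNumbers) (h2 : w2 ∈ pvSpelledNumbers)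
    (s1 : w1 <+: q) (s2 : w2 <+: q) : w1 = w2 := by
  rcases List.prefix_or_prefix_of_prefix s1 s2 with h | h
  · exact words_no_prefix w1 h1 w2 h2 h
  · exact (words_no_prefix w2 h2 w1 h1 h).symm

lemma mem_words_of_mem_pats {wv : List Char × Int} (h : wv ∈ pvPats) : wv.1 ∈ pvSpelledNumbers := by
  rw [← pats_keys]
  exact List.mem_map.mpr ⟨wv, h, rfl⟩

-- a nonempty suffix of l ++ [c] ends with c
lemma suffix_getLast {w l : List Char} {c : Char} (h : w <:+ l ++ [c]) (hne : w ≠ []) :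
    w.getLast? = some c := by
  obtain ⟨s, hs⟩ := h
  rw [← List.getLast?_append_of_ne_nil s hne, hs, List.getLast?_concat]

-- the main invariant for the left-to-right scan:
-- A's accumulator is p (no spelled number is yet a substring of it), B's buffer its last five chars
lemma first_eq (cs p : List Char) (H : ∀ w ∈ pvSpelledNumbers, ¬ w <:+: p) :
    getFirstGo cs p = scanGo cs (p.drop (p.length - 5)) pvPats pvLasts := by
  induction cs generalizing p with
  | nil => simp [getFirstGo, scanGo]
  | cons c rest ih =>
    simp only [getFirstGo, scanGo]
    split_ifs with hd ha hcc
    · rfl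
    · -- some spelled number ends at this character
      rw [buf_step p c] at hcc ⊢
      rw [Bool.and_eq_true] at hcc
      have hany := hcc.2
      obtain ⟨wv, hwv, hsufb⟩ := List.any_eq_true.mp hany
      have hw0 : wv.1 ∈ pvSpelledNumbers := mem_words_of_mem_pats hwv
      have hsuf : wv.1 <:+ p ++ [c] :=
        (List.isSuffixOf_iff_suffix.mp hsufb).trans (List.drop_suffix _ _)
      have hA : line_to_spelled_number (p ++ [c]) = some wv.1 := by
        apply find?_unique hw0 ((PySem.Chars.isIn_iff_infix wv.1 (p ++ [c])).mpr hsuf.isInfix)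
        intro y hy hyp
        have hysuf : y <:+ p ++ [c] :=
          infix_snoc_elim ((PySem.Chars.isIn_iff_infix y (p ++ [c])).mp hyp) (H y hy)
        exact suffix_unique hy hw0 hysuf hsuf
      have hB : pvPats.findSome?
          (fun uv => if uv.1.isSuffixOf ((p ++ [c]).drop ((p ++ [c]).length - 5)) then some uv.2 else none)
          = some wv.2 := by
        apply findSome?_unique (p := fun k => k.isSuffixOf ((p ++ [c]).drop ((p ++ [c]).length - 5)))
          (by simpa using hwv) hsufb
        intro uv huv hup
        have husuf : uv.1 <:+ p ++ [c] :=
          (List.isSuffixOf_iff_suffix.mp hup).trans (List.drop_suffix _ _)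
        have : uv.1 = wv.1 := suffix_unique (mem_words_of_mem_pats huv) hw0 husuf hsuf
        simpa using pats_key_inj uv huv wv hwv this
      rw [hA, hB]
      exact pats_getD wv hwv
    · -- no spelled number is a substring yet: both sides advance
      rw [buf_step p c] at hcc ⊢
      have H' : ∀ w ∈ pvSpelledNumbers, ¬ w <:+: p ++ [c] := by
        intro w hw hinf
        have hsuf : w <:+ p ++ [c] := infix_snoc_elim hinf (H w hw)
        have hsufb : w <:+ (p ++ [c]).drop ((p ++ [c]).length - 5) :=
          suffix_drop5 hsuf (words_len w hw)
        obtain ⟨wv, hwv, hkey⟩ : ∃ wv ∈ pvPats, wv.1 = w := by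
          rw [← pats_keys] at hw
          obtain ⟨wv, hwv, hk⟩ := List.mem_map.mp hw
          exact ⟨wv, hwv, hk⟩
        apply hcc
        rw [Bool.and_eq_true]
        constructor
        · have hl : w.getLast? = some c := suffix_getLast hsuf (words_ne_nil w hw)
          simpa [hl] using words_last w hw
        · exact List.any_eq_true.mpr ⟨wv, hwv, List.isSuffixOf_iff_suffix.mpr (hkey ▸ hsufb)⟩
      have hA : line_to_spelled_number (p ++ [c]) = none := by
        apply List.find?_eq_none.mpr
        intro w hw
        simp only [PySem.Chars.isIn_iff_infix]
        exact H' w hw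
      rw [hA]
      exact ih (p ++ [c]) H'
    · exact ih p H

-- the mirrored invariant for the right-to-left scan: A's accumulator is the true-order
-- suffix p, B's buffer the last five chars of its reversal (the reversed stream's tail)
lemma last_eq (cs p : List Char) (H : ∀ w ∈ pvSpelledNumbers, ¬ w <:+: p) :
    getLastGo cs p = scanGo cs (p.reverse.drop (p.reverse.length - 5)) pvPatsRev pvLastsRev := by
  induction cs generalizing p with
  | nil => simp [getLastGo, scanGo]
  | cons c rest ih =>
    simp only [getLastGo, scanGo]
    split_ifs with hd ha hcc
    · rfl
    · -- some spelled number starts at this character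
      rw [buf_step p.reverse c, ← List.reverse_cons] at hcc ⊢
      rw [Bool.and_eq_true] at hcc
      have hany := hcc.2
      obtain ⟨uv, huv, hsufb⟩ := List.any_eq_true.mp hany
      obtain ⟨wv, hwv, hsveq⟩ := List.mem_map.mp huv
      have hw0 : wv.1 ∈ pvSpelledNumbers := mem_words_of_mem_pats hwv
      have hrsuf : uv.1 <:+ (c :: p).reverse :=
        (List.isSuffixOf_iff_suffix.mp hsufb).trans (List.drop_suffix _ _)
      have hpre : wv.1 <+: c :: p := by
        rw [← hsveq] at hrsuf
        exact List.reverse_suffix.mp hrsuf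
      have hA : line_to_spelled_number (c :: p) = some wv.1 := by
        apply find?_unique hw0 ((PySem.Chars.isIn_iff_infix wv.1 (c :: p)).mpr hpre.isInfix)
        intro y hy hyp
        have hypre : y <+: c :: p :=
          infix_cons_elim ((PySem.Chars.isIn_iff_infix y (c :: p)).mp hyp) (H y hy)
        exact prefix_unique hy hw0 hypre hpre
      have hB : pvPatsRev.findSome?
          (fun uv => if uv.1.isSuffixOf ((c :: p).reverse.drop ((c :: p).reverse.length - 5)) then some uv.2 else none)
          = some wv.2 := by
        apply findSome?_unique (p := fun k => k.isSuffixOf ((c :: p).reverse.drop ((c :: p).reverse.length - 5)))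
          (w := wv.1.reverse) (List.mem_map.mpr ⟨wv, hwv, rfl⟩) (by rw [← hsveq] at hsufb; exact hsufb)
        intro sv hsv hsp
        obtain ⟨tv, htv, htveq⟩ := List.mem_map.mp hsv
        have hssuf : sv.1 <:+ (c :: p).reverse :=
          (List.isSuffixOf_iff_suffix.mp hsp).trans (List.drop_suffix _ _)
        have hspre : tv.1 <+: c :: p := by
          rw [← htveq] at hssuf
          exact List.reverse_suffix.mp hssuf
        have : tv.1 = wv.1 := prefix_unique (mem_words_of_mem_pats htv) hw0 hspre hpre
        apply patsRev_key_inj sv hsv (wv.1.reverse, wv.2) (List.mem_map.mpr ⟨wv, hwv, rfl⟩)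
        rw [← htveq, this]
      rw [hA, hB]
      exact pats_getD wv hwv
    · -- no spelled number is a substring yet: both sides advance
      rw [buf_step p.reverse c, ← List.reverse_cons] at hcc ⊢
      have H' : ∀ w ∈ pvSpelledNumbers, ¬ w <:+: c :: p := by
        intro w hw hinf
        have hpre : w <+: c :: p := infix_cons_elim hinf (H w hw)
        have hrsuf : w.reverse <:+ (c :: p).reverse := List.reverse_suffix.mpr hpre
        have hsufb : w.reverse <:+ (c :: p).reverse.drop ((c :: p).reverse.length - 5) :=
          suffix_drop5 hrsuf (by simpa using words_len w hw)
        obtain ⟨wv, hwv, hkey⟩ : ∃ wv ∈ pvPats, wv.1 = w := by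
          rw [← pats_keys] at hw
          obtain ⟨wv, hwv, hk⟩ := List.mem_map.mp hw
          exact ⟨wv, hwv, hk⟩
        apply hcc
        rw [Bool.and_eq_true]
        constructor
        · have hl : wv.1.reverse.getLast? = some c := by
            apply suffix_getLast (l := (c :: p).reverse.dropLast)
            · have hsplit : (c :: p).reverse = (c :: p).reverse.dropLast ++ [c] := by
                simp [List.reverse_cons]
              rw [← hsplit, hkey]
              exact hrsuf
            · rw [hkey]
              simpa using words_ne_nil w hw
          simpa [hl] using patsRev_last (wv.1.reverse, wv.2) (List.mem_map.mpr ⟨wv, hwv, rfl⟩)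
        · exact List.any_eq_true.mpr ⟨(wv.1.reverse, wv.2), List.mem_map.mpr ⟨wv, hwv, rfl⟩,
            List.isSuffixOf_iff_suffix.mpr (by rw [hkey]; exact hsufb)⟩
      have hA : line_to_spelled_number (c :: p) = none := by
        apply List.find?_eq_none.mpr
        intro w hw
        simp only [PySem.Chars.isIn_iff_infix]
        exact H' w hw
      rw [hA]
      exact ih (c :: p) H'
    · exact ih p H

lemma scan_range (cs : List Char) (ws : List (List Char × Int)) (lasts : List Char)
    (hws : ∀ wv ∈ ws, 0 ≤ wv.2 ∧ wv.2 ≤ 9) :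
    ∀ buf, 0 ≤ scanGo cs buf ws lasts ∧ scanGo cs buf ws lasts ≤ 9 := by
  induction cs with
  | nil => intro buf; simp [scanGo]
  | cons c rest ih =>
    intro buf
    simp only [scanGo]
    split_ifs with hd ha hcc
    · simp [Char.isDigit] at hd
      obtain ⟨hd1, hd2⟩ := hd
      have hd1' : 48 ≤ c.toNat := UInt32.le_iff_toNat_le.mp hd1
      have hd2' : c.toNat ≤ 57 := UInt32.le_iff_toNat_le.mp hd2
      omega
    · cases hfs : ws.findSome?
        (fun wv => if wv.1.isSuffixOf ((buf ++ [c]).drop ((buf ++ [c]).length - 5)) then some wv.2 else none) with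
      | none => simpa [hfs] using ih _
      | some v =>
        obtain ⟨wv, hwv, hf⟩ := List.exists_of_findSome?_eq_some hfs
        have hv : v = wv.2 := by
          by_cases hsc : wv.1.isSuffixOf ((buf ++ [c]).drop ((buf ++ [c]).length - 5)) = true
          · rw [if_pos hsc] at hf
            exact (Option.some.inj hf).symm
          · rw [if_neg hsc] at hf
            cases hf
        show 0 ≤ v ∧ v ≤ 9
        obtain ⟨h1, h2⟩ := hws wv hwv
        omega
    · exact ih _
    · exact ih buf

lemma parse_two (f l : Int) (hf0 : 0 ≤ f) (hf9 : f ≤ 9) (hl0 : 0 ≤ l) (hl9 : l ≤ 9) :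
    (PySem.Int.ofChars? (PySem.Int.toChars f ++ PySem.Int.toChars l)).getD 0 = 10 * f + l := by
  interval_cases f <;> interval_cases l <;> decide

lemma nil_no_infix : ∀ w ∈ pvSpelledNumbers, ¬ w <:+: ([] : List Char) := by
  intro w hw hc
  exact words_ne_nil w hw (List.eq_nil_of_infix_nil hc)

lemma line_eq (line : List Char) :
    (PySem.Int.ofChars? (PySem.Int.toChars (get_first_digit line) ++ PySem.Int.toChars (get_last_digit line))).getD 0
      = 10 * scanGo line [] pvPats pvLasts + scanGo line.reverse [] pvPatsRev pvLastsRev := by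
  have h1 : get_first_digit line = scanGo line [] pvPats pvLasts := by
    simpa using first_eq line [] nil_no_infix
  have h2 : get_last_digit line = scanGo line.reverse [] pvPatsRev pvLastsRev := by
    simpa using last_eq line.reverse [] nil_no_infix
  rw [h1, h2]
  obtain ⟨ha, hb⟩ := scan_range line pvPats pvLasts pats_range []
  obtain ⟨hc, hd⟩ := scan_range line.reverse pvPatsRev pvLastsRev patsRev_range []
  exact parse_two _ _ ha hb hc hd

-- ===== VERDICT (by name: the statement is the Claim_ definition above) =====
theorem process_calibration_document_spec : Claim_equal_process_calibration_document := by
  intro document _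
  unfold Spec_process_calibration_document process_calibration_document process_calibration_document_alt
  have h : (fun (total : Int) (line : String) =>
        total + (PySem.Int.ofChars? (PySem.Int.toChars (get_first_digit line.toList) ++
          PySem.Int.toChars (get_last_digit line.toList))).getD 0)
      = (fun (total : Int) (line : String) =>
        total + (10 * scanGo line.toList [] pvPats pvLasts
          + scanGo line.toList.reverse [] pvPatsRev pvLastsRev)) := by
    funext total line
    rw [line_eq]
  rw [h]
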